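-- pv_equiv track=rewrite | github.com/KnottyDyes/cribl-hc | src/cribl_hc/analyzers/alerting.py | _calculate_alerting_score
-- ===== SOURCE A (Python) =====
-- from typing import Any, Dict, List, Set
--
-- def _calculate_alerting_score(
--
--     targets: List[Dict[str, Any]],
--     notifications: List[Dict[str, Any]],
--     target_issues: List[Dict[str, Any]],
--     notification_issues: List[Dict[str, Any]]
-- ) -> int:
--     """
--     Calculate alerting infrastructure health score (0-100).
--
--     Args:
--         targets: List of notification targets
--         notifications: List of notifications
--         target_issues: Issues found with targets
--         notification_issues: Issues found with notifications
--
--     Returns: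
--         Health score from 0 to 100
--     """
--     score = 100
--
--     # No targets configured = major penalty
--     if not targets:
--         score -= 50
--
--     # No notifications = moderate penalty
--     if not notifications:
--         score -= 30
--
--     # Deduct for each issue type
--     for issue in target_issues:
--         if issue.get("issue") == "no_targets":
--             score -= 30
--         elif issue.get("issue") == "no_critical_targets":
--             score -= 15
--         elif issue.get("issue") == "disabled_targets":
--             score -= 5
--
--     for issue in notification_issues:
--         if issue.get("issue") == "no_notifications":
--             score -= 20
--         elif issue.get("issue") == "no_targets":
--             score -= 10
--         elif issue.get("issue") == "invalid_targets":
--             score -= 15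
--         elif issue.get("issue") == "disabled_notifications":
--             score -= 5
--
--     return max(0, score)
-- ===== SOURCE B (Python) =====
-- from typing import Any, Dict, List
--
-- _TARGET_TABLE = (("no_targets", 30), ("no_critical_targets", 15), ("disabled_targets", 5))
-- _NOTIFICATION_TABLE = (("no_notifications", 20), ("no_targets", 10),
--                        ("invalid_targets", 15), ("disabled_notifications", 5))
--
-- def _calculate_alerting_score(
--     targets: List[Dict[str, Any]],
--     notifications: List[Dict[str, Any]],
--     target_issues: List[Dict[str, Any]],
--     notification_issues: List[Dict[str, Any]]
-- ) -> int:
--     # Accumulate a total penalty, driven by the fixed penalty tables: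
--     # for each known issue type, count its occurrences in the issue list.
--     t_keys = [i.get("issue") for i in target_issues]
--     n_keys = [i.get("issue") for i in notification_issues]
--     penalty = (0 if targets else 50) + (0 if notifications else 30)
--     for key, pts in _TARGET_TABLE:
--         penalty += t_keys.count(key) * pts
--     for key, pts in _NOTIFICATION_TABLE:
--         penalty += n_keys.count(key) * pts
--     return max(0, 100 - penalty)
-- ===== Notes on version B (the rewrite author's own statement) =====
-- stated objective: alternative
-- what changed: B transposes the loops: instead of A's per-issue if/elif chain, B accumulates a total penalty by iterating over the fixed penalty tables and counting each issue type's occurrences in the issue lists, then returns max(0, 100 - penalty).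
import Mathlib
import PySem

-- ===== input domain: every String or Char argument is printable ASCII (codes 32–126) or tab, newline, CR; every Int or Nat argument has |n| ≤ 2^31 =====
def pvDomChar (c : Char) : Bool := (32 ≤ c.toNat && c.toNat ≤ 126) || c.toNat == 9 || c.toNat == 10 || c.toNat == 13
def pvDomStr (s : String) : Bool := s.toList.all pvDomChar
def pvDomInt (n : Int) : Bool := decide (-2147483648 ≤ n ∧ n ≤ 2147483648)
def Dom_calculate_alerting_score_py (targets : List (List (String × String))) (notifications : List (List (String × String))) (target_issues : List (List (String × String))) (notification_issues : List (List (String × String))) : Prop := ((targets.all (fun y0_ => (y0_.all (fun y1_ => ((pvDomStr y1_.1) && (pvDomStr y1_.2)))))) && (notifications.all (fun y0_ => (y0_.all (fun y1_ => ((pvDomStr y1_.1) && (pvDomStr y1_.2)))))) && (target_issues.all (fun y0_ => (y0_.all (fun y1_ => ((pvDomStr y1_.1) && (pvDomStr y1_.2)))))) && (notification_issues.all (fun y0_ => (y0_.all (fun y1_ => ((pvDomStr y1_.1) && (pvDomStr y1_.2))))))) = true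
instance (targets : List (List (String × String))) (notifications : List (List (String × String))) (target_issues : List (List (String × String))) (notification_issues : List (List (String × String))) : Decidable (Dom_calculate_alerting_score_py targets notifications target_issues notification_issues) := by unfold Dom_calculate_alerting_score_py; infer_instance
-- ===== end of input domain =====

-- B accumulates a total penalty by iterating over fixed penalty tables and counting each issue type in the issue lists, instead of A's per-issue if/elif chain (alternative decomposition, same cost).


-- ===== PORT A =====
def pvGetIssueA (issue : List (String × String)) : Option String :=
  (PySem.Dict.mk issue).get? "issue"

def calculate_alerting_score_py (targets : List (List (String × String))) (notifications : List (List (String × String))) (target_issues : List (List (String × String))) (notification_issues : List (List (String × String))) : Int :=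
  let score : Int := 100
  let score := if targets.isEmpty then score - 50 else score
  let score := if notifications.isEmpty then score - 30 else score
  let score := target_issues.foldl (fun score issue =>
    if pvGetIssueA issue == some "no_targets" then score - 30
    else if pvGetIssueA issue == some "no_critical_targets" then score - 15
    else if pvGetIssueA issue == some "disabled_targets" then score - 5
    else score) score
  let score := notification_issues.foldl (fun score issue =>
    if pvGetIssueA issue == some "no_notifications" then score - 20
    else if pvGetIssueA issue == some "no_targets" then score - 10
    else if pvGetIssueA issue == some "invalid_targets" then score - 15
    else if pvGetIssueA issue == some "disabled_notifications" then score - 5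
    else score) score
  max 0 score

-- ===== PORT B =====
-- table-driven: for each known issue type, count its occurrences and add count * points
def pvTargetTable : List (String × Int) :=
  [("no_targets", 30), ("no_critical_targets", 15), ("disabled_targets", 5)]

def pvNotificationTable : List (String × Int) :=
  [("no_notifications", 20), ("no_targets", 10), ("invalid_targets", 15), ("disabled_notifications", 5)]

def pvGetIssueB (issue : List (String × String)) : Option String :=
  (PySem.Dict.mk issue).get? "issue"

def calculate_alerting_score_py_alt (targets : List (List (String × String))) (notifications : List (List (String × String))) (target_issues : List (List (String × String))) (notification_issues : List (List (String × String))) : Int :=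
  let t_keys := target_issues.map pvGetIssueB
  let n_keys := notification_issues.map pvGetIssueB
  let penalty : Int := (if targets.isEmpty then 50 else 0) + (if notifications.isEmpty then 30 else 0)
  let penalty := pvTargetTable.foldl
    (fun p kp => p + ((PySem.List.count t_keys (some kp.1) : Int)) * kp.2) penalty
  let penalty := pvNotificationTable.foldl
    (fun p kp => p + ((PySem.List.count n_keys (some kp.1) : Int)) * kp.2) penalty
  max 0 (100 - penalty)

-- ===== PRECONDITION & SPEC =====
def Spec_calculate_alerting_score_py (targets : List (List (String × String))) (notifications : List (List (String × String))) (target_issues : List (List (String × String))) (notification_issues : List (List (String × String))) (out : Int) : Prop := out = calculate_alerting_score_py_alt targets notifications target_issues notification_issues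
instance (targets : List (List (String × String))) (notifications : List (List (String × String))) (target_issues : List (List (String × String))) (notification_issues : List (List (String × String))) (out : Int) : Decidable (Spec_calculate_alerting_score_py targets notifications target_issues notification_issues out) := by unfold Spec_calculate_alerting_score_py; infer_instance

-- ===== CLAIM =====
def Claim_equal_calculate_alerting_score_py : Prop := ∀ (targets : List (List (String × String))) (notifications : List (List (String × String))) (target_issues : List (List (String × String))) (notification_issues : List (List (String × String))), Dom_calculate_alerting_score_py targets notifications target_issues notification_issues → Spec_calculate_alerting_score_py targets notifications target_issues notification_issues (calculate_alerting_score_py targets notifications target_issues notification_issues)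

-- ===== LEMMAS AND PROOFS =====

-- penalty assigned to one issue key by A's target if/elif chain
def penT (g : Option String) : Int :=
  if g = some "no_targets" then 30 else if g = some "no_critical_targets" then 15
  else if g = some "disabled_targets" then 5 else 0

def penN (g : Option String) : Int :=
  if g = some "no_notifications" then 20 else if g = some "no_targets" then 10
  else if g = some "invalid_targets" then 15 else if g = some "disabled_notifications" then 5
  else 0

-- A's if-chain loop body is 'subtract penT'
lemma bodyT_eq : (fun (score : Int) (issue : List (String × String)) =>
    if pvGetIssueA issue == some "no_targets" then score - 30
    else if pvGetIssueA issue == some "no_critical_targets" then score - 15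
    else if pvGetIssueA issue == some "disabled_targets" then score - 5
    else score)
    = fun score issue => score - penT (pvGetIssueA issue) := by
  funext score issue
  unfold penT
  split_ifs with h1 h2 h3 <;> simp_all

lemma bodyN_eq : (fun (score : Int) (issue : List (String × String)) =>
    if pvGetIssueA issue == some "no_notifications" then score - 20
    else if pvGetIssueA issue == some "no_targets" then score - 10
    else if pvGetIssueA issue == some "invalid_targets" then score - 15
    else if pvGetIssueA issue == some "disabled_notifications" then score - 5
    else score)
    = fun score issue => score - penN (pvGetIssueA issue) := by
  funext score issue
  unfold penN
  split_ifs with h1 h2 h3 h4 <;> simp_all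

-- a subtracting fold is the start value minus the sum of the subtracted amounts
lemma foldl_sub {α : Type} (f : α → Int) (xs : List α) : ∀ (s : Int),
    xs.foldl (fun s i => s - f i) s = s - (xs.map f).sum := by
  induction xs with
  | nil => simp
  | cons a xs ih => intro s; simp [List.foldl_cons, ih]; ring

-- per-issue penT sum equals the table-driven per-key count dot product
lemma sumT_eq_counts (xs : List (Option String)) : (xs.map penT).sum =
    (xs.count (some "no_targets") : Int) * 30 + (xs.count (some "no_critical_targets") : Int) * 15
    + (xs.count (some "disabled_targets") : Int) * 5 := by
  induction xs with
  | nil => simp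
  | cons a xs ih =>
    simp only [List.map_cons, List.sum_cons, ih, List.count_cons]
    unfold penT
    split_ifs with h1 h2 h3 <;> subst_vars <;> simp_all <;> ring

lemma sumN_eq_counts (xs : List (Option String)) : (xs.map penN).sum =
    (xs.count (some "no_notifications") : Int) * 20 + (xs.count (some "no_targets") : Int) * 10
    + (xs.count (some "invalid_targets") : Int) * 15
    + (xs.count (some "disabled_notifications") : Int) * 5 := by
  induction xs with
  | nil => simp
  | cons a xs ih =>
    simp only [List.map_cons, List.sum_cons, ih, List.count_cons]
    unfold penN
    split_ifs with h1 h2 h3 h4 <;> subst_vars <;> simp_all <;> ring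

-- ===== VERDICT =====
theorem calculate_alerting_score_py_spec : Claim_equal_calculate_alerting_score_py := by
  intro targets notifications target_issues notification_issues _
  unfold Spec_calculate_alerting_score_py
  unfold calculate_alerting_score_py calculate_alerting_score_py_alt
  rw [bodyT_eq, bodyN_eq]
  have hAB : pvGetIssueA = pvGetIssueB := rfl
  simp only [foldl_sub, pvTargetTable, pvNotificationTable, List.foldl_cons, List.foldl_nil,
    PySem.List.count_eq, hAB]
  have h1 : (List.map (fun i => penT (pvGetIssueB i)) target_issues).sum
      = ((target_issues.map pvGetIssueB).map penT).sum := by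
    simp [List.map_map, Function.comp_def]
  have h2 : (List.map (fun i => penN (pvGetIssueB i)) notification_issues).sum
      = ((notification_issues.map pvGetIssueB).map penN).sum := by
    simp [List.map_map, Function.comp_def]
  rw [h1, h2, sumT_eq_counts, sumN_eq_counts]
  split_ifs <;> ring_nf
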